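-- pv_equiv track=rewrite | github.com/InternetHealthReport/ixp-dependency | stats-scripts/compute-ixp-table.py | map_national
-- ===== SOURCE A (Python) =====
-- from typing import Tuple
--
-- def map_national(ixp_cc: str,
--                  dependencies: set,
--                  asn_cc: dict) -> Tuple[int, int, int]:
--     national = 0
--     international = 0
--     unknown = 0
--     for asn in dependencies:
--         if asn not in asn_cc:
--             unknown += 1
--             continue
--         if asn_cc[asn] == ixp_cc:
--             national += 1
--         else:
--             international += 1
--     return national, international, unknown
-- ===== SOURCE B (Python) =====
-- def map_national(ixp_cc, dependencies, asn_cc):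
--     # Inverted traversal: scan the dict's items instead of the dependency set.
--     # Each dict entry whose key is a dependency is classified by its country;
--     # whatever dependencies the dict never mentions are the unknowns.
--     national = 0
--     international = 0
--     for asn, cc in asn_cc.items():
--         if asn in dependencies:
--             if cc == ixp_cc:
--                 national += 1
--             else:
--                 international += 1
--     return national, international, len(dependencies) - national - international
-- ===== Notes on version B (the rewrite author's own statement) =====
-- stated objective: alternative
-- what changed: Loops over the dict's items instead of over the dependency set: counts dict entries whose key is a dependency, split by country, and derives unknown as the remaining set size; correct because set elements and dict keys are distinct (stated in Pre_).
import Mathlib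
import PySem

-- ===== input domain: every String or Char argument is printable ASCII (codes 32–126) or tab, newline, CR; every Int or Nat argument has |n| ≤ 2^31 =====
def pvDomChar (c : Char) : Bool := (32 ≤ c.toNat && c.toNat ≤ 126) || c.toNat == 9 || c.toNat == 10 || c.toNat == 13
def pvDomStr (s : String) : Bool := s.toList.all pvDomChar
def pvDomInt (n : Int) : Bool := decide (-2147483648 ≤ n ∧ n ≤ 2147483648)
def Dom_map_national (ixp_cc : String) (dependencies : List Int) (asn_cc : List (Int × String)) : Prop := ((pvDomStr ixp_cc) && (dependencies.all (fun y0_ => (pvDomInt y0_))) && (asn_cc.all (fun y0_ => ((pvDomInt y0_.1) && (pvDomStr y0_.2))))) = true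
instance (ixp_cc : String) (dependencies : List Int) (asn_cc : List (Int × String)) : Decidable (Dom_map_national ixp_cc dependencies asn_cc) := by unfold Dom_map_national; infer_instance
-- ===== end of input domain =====

-- ===== PORT A =====
-- literal transliteration of A: one loop over the dependency set, three counters, three-way branch
def map_national (ixp_cc : String) (dependencies : List Int) (asn_cc : List (Int × String)) : Int × Int × Int :=
  dependencies.foldl (fun (s : Int × Int × Int) asn =>
    match asn_cc.lookup asn with
    | none => (s.1, s.2.1, s.2.2 + 1)              -- asn not in asn_cc: unknown += 1
    | some cc =>
      if cc = ixp_cc then (s.1 + 1, s.2.1, s.2.2)  -- national += 1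
      else (s.1, s.2.1 + 1, s.2.2))                -- international += 1
    (0, 0, 0)

-- ===== PORT B =====
-- B inverts the traversal: one loop over the DICT's items, counting entries whose key is a
-- dependency (split national/international by country); unknown = the remaining set size.
def map_national_alt (ixp_cc : String) (dependencies : List Int) (asn_cc : List (Int × String)) : Int × Int × Int :=
  let s := asn_cc.foldl (fun (s : Int × Int) p =>
      if p.1 ∈ dependencies then
        if p.2 = ixp_cc then (s.1 + 1, s.2) else (s.1, s.2 + 1)
      else s) (0, 0)
  (s.1, s.2, (dependencies.length : Int) - s.1 - s.2)

-- ===== PRECONDITION & SPEC =====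
-- Pre_ only states the type-convention invariants: 'dependencies' encodes a Python set (distinct
-- elements) and 'asn_cc' a Python dict (distinct keys); no genuine Python input is excluded.
def Pre_map_national (ixp_cc : String) (dependencies : List Int) (asn_cc : List (Int × String)) : Prop :=
  dependencies.Nodup ∧ (asn_cc.map Prod.fst).Nodup
instance (ixp_cc : String) (dependencies : List Int) (asn_cc : List (Int × String)) : Decidable (Pre_map_national ixp_cc dependencies asn_cc) := by unfold Pre_map_national; infer_instance

def pvWitness_map_national : String × List Int × (List (Int × String)) :=
  ("US", [1, 2, 5], [(1, "US"), (3, "FR"), (5, "DE")])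

def Spec_map_national (ixp_cc : String) (dependencies : List Int) (asn_cc : List (Int × String)) (out : Int × Int × Int) : Prop := out = map_national_alt ixp_cc dependencies asn_cc
instance (ixp_cc : String) (dependencies : List Int) (asn_cc : List (Int × String)) (out : Int × Int × Int) : Decidable (Spec_map_national ixp_cc dependencies asn_cc out) := by unfold Spec_map_national; infer_instance

-- ===== CLAIM (what is proved, stated in full; the proofs are below) =====
def Claim_equal_map_national : Prop := ∀ (ixp_cc : String) (dependencies : List Int) (asn_cc : List (Int × String)), Dom_map_national ixp_cc dependencies asn_cc → Pre_map_national ixp_cc dependencies asn_cc → Spec_map_national ixp_cc dependencies asn_cc (map_national ixp_cc dependencies asn_cc)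

-- ===== LEMMAS AND PROOFS =====

-- A's loop: fold over the dependencies counts (national, length - national - unknown, unknown)
theorem map_national_foldl (ixp_cc : String) (asn_cc : List (Int × String)) :
    ∀ (deps : List Int) (a b c : Int),
    deps.foldl (fun (s : Int × Int × Int) asn =>
      match asn_cc.lookup asn with
      | none => (s.1, s.2.1, s.2.2 + 1)
      | some cc =>
        if cc = ixp_cc then (s.1 + 1, s.2.1, s.2.2)
        else (s.1, s.2.1 + 1, s.2.2)) (a, b, c)
    = (a + (deps.countP (fun x => match asn_cc.lookup x with | some v => decide (v = ixp_cc) | none => false) : Nat),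
       b + ((deps.length : Int)
            - (deps.countP (fun x => match asn_cc.lookup x with | some v => decide (v = ixp_cc) | none => false) : Nat)
            - (deps.countP (fun x => (asn_cc.lookup x).isNone) : Nat)),
       c + (deps.countP (fun x => (asn_cc.lookup x).isNone) : Nat)) := by
  intro deps
  induction deps with
  | nil => intro a b c; simp
  | cons x xs ih =>
    intro a b c
    simp only [List.foldl_cons, List.countP_cons, List.length_cons]
    cases h : asn_cc.lookup x with
    | none =>
      simp only [h]
      rw [ih]
      simp
      and_intros <;> (push_cast; ring)
    | some cc =>
      by_cases hcc : cc = ixp_cc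
      · simp only [h, hcc, if_pos rfl]
        rw [ih]
        simp
        and_intros <;> (push_cast; ring)
      · simp only [h, if_neg hcc]
        rw [ih]
        simp [hcc]
        and_intros <;> (push_cast; ring)

-- B's loop: fold over the dict's items counts matching / non-matching entries with key in deps
theorem map_national_alt_foldl (ixp_cc : String) (deps : List Int) :
    ∀ (L : List (Int × String)) (a b : Int),
    L.foldl (fun (s : Int × Int) p =>
      if p.1 ∈ deps then
        if p.2 = ixp_cc then (s.1 + 1, s.2) else (s.1, s.2 + 1)
      else s) (a, b)
    = (a + (L.countP (fun p => decide (p.1 ∈ deps) && decide (p.2 = ixp_cc)) : Nat),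
       b + (L.countP (fun p => decide (p.1 ∈ deps) && !decide (p.2 = ixp_cc)) : Nat)) := by
  intro L
  induction L with
  | nil => intro a b; simp
  | cons p ps ih =>
    intro a b
    simp only [List.foldl_cons, List.countP_cons]
    by_cases hm : p.1 ∈ deps
    · by_cases he : p.2 = ixp_cc
      · simp only [if_pos hm, if_pos he]
        rw [ih]; simp [hm, he]; and_intros <;> (push_cast; ring)
      · simp only [if_pos hm, if_neg he]
        rw [ih]; simp [hm, he]; and_intros <;> (push_cast; ring)
    · simp only [if_neg hm]
      rw [ih]; simp [hm]

-- no key means no lookup hit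
theorem lookup_none_of_not_mem_keys (k : Int) :
    ∀ (L : List (Int × String)), k ∉ L.map Prod.fst → L.lookup k = none := by
  intro L
  induction L with
  | nil => intro _; simp [List.lookup]
  | cons p ps ih =>
    intro h
    simp only [List.map_cons, List.mem_cons] at h
    obtain ⟨h1, h2⟩ := not_or.mp h
    have hk : (k == p.1) = false := by simp [h1]
    simp only [List.lookup, hk]
    exact ih h2

-- shifting a count across a predicate that differs from q only at the (nodup-unique) point k
theorem countP_shift (k : Int) (p q : Int → Bool) (hpq : ∀ a, a ≠ k → p a = q a)
    (hqk : q k = false) :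
    ∀ (deps : List Int), deps.Nodup →
    deps.countP p = deps.countP q + (if k ∈ deps ∧ p k then 1 else 0) := by
  intro deps
  induction deps with
  | nil => intro _; simp
  | cons d ds ih =>
    intro hnd
    have hnd' : ds.Nodup := hnd.of_cons
    simp only [List.countP_cons]
    by_cases hdk : d = k
    · subst hdk
      have hmem : d ∉ ds := by simpa using (List.nodup_cons.mp hnd).1
      have hq : ds.countP p = ds.countP q := by
        apply List.countP_congr
        intro a ha
        rw [hpq a (fun hak => hmem (hak ▸ ha))]
      rw [hq, hqk]
      by_cases hp : p d = true
      · simp [hp]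
      · simp at hp
        simp [hp]
    · have hpd : p d = q d := hpq d hdk
      rw [ih hnd', hpd]
      have hmem : (k ∈ d :: ds ∧ p k) ↔ (k ∈ ds ∧ p k) := by
        constructor
        · rintro ⟨hk, hpk⟩
          rcases List.mem_cons.mp hk with h | h
          · exact absurd h.symm hdk
          · exact ⟨h, hpk⟩
        · rintro ⟨hk, hpk⟩; exact ⟨List.mem_cons_of_mem _ hk, hpk⟩
      by_cases hcond : k ∈ ds ∧ p k
      · rw [if_pos hcond, if_pos (hmem.mpr hcond)]; ring
      · rw [if_neg hcond, if_neg (fun h => hcond (hmem.mp h))]; ring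

-- the bridge: counting dependencies through the lookup equals counting dict entries with key in deps
theorem countP_lookup (deps : List Int) (P : String → Bool) (hd : deps.Nodup) :
    ∀ (L : List (Int × String)), (L.map Prod.fst).Nodup →
    deps.countP (fun x => match L.lookup x with | some v => P v | none => false)
    = L.countP (fun p => decide (p.1 ∈ deps) && P p.2) := by
  intro L
  induction L with
  | nil => intro _; simp [List.lookup]
  | cons p ps ih =>
    intro hk
    simp only [List.map_cons, List.nodup_cons] at hk
    obtain ⟨hknotin, hk'⟩ := hk
    have hlk : ps.lookup p.1 = none := lookup_none_of_not_mem_keys p.1 ps hknotin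
    have hstep := countP_shift p.1
      (fun x => match (p :: ps).lookup x with | some v => P v | none => false)
      (fun x => match ps.lookup x with | some v => P v | none => false)
      (by
        intro a hak
        have : (a == p.1) = false := by simp [hak]
        simp [List.lookup, this])
      (by simp [hlk]) deps hd
    rw [hstep, ih hk', List.countP_cons]
    have hlook : (p :: ps).lookup p.1 = some p.2 := by
      cases p with
      | mk k v => simp [List.lookup]
    by_cases hm : p.1 ∈ deps
    · by_cases hP : P p.2 = true
      · rw [if_pos ⟨hm, by simp [hlook, hP]⟩]
        simp [hm, hP]
      · simp at hP
        rw [if_neg (by simp [hlook, hP])]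
        simp [hP]
    · rw [if_neg (by simp [hm])]
      simp [hm]

-- a dict entry's key is in deps iff it matches the country or not: the two tallies add to the membership count
theorem countP_split (deps : List Int) (ixp_cc : String) :
    ∀ (L : List (Int × String)),
    L.countP (fun p => decide (p.1 ∈ deps) && decide (p.2 = ixp_cc))
    + L.countP (fun p => decide (p.1 ∈ deps) && !decide (p.2 = ixp_cc))
    = L.countP (fun p => decide (p.1 ∈ deps)) := by
  intro L
  induction L with
  | nil => simp
  | cons p ps ih =>
    simp only [List.countP_cons]
    by_cases hm : p.1 ∈ deps
    · by_cases he : p.2 = ixp_cc <;> simp [hm, he] <;> omega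
    · simp [hm]; omega

-- found + not-found = all dependencies
theorem countP_some_none (L : List (Int × String)) :
    ∀ (deps : List Int),
    deps.countP (fun x => match L.lookup x with | some _ => true | none => false)
    + deps.countP (fun x => (L.lookup x).isNone) = deps.length := by
  intro deps
  induction deps with
  | nil => simp
  | cons d ds ih =>
    simp only [List.countP_cons, List.length_cons]
    cases h : L.lookup d <;> simp [h] <;> omega

-- ===== VERDICT (by name: the statement is the Claim_ definition above) =====
theorem map_national_spec : Claim_equal_map_national := by
  intro ixp_cc deps asn_cc _ hpre
  obtain ⟨hd, hk⟩ := hpre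
  unfold Spec_map_national map_national map_national_alt
  rw [map_national_foldl, map_national_alt_foldl]
  have h1 := countP_lookup deps (fun v => decide (v = ixp_cc)) hd asn_cc hk
  have h2 := countP_lookup deps (fun _ => true) hd asn_cc hk
  have h3 := countP_split deps ixp_cc asn_cc
  have h4 := countP_some_none asn_cc deps
  simp only [Bool.and_true] at h2
  have hT : deps.countP (fun x => match asn_cc.lookup x with | some v => decide (v = ixp_cc) | none => false)
      = asn_cc.countP (fun p => decide (p.1 ∈ deps) && decide (p.2 = ixp_cc)) := h1
  refine Prod.ext ?_ (Prod.ext ?_ ?_) <;> simp only [] <;> omega
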